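-- pv_equiv track=rewrite | github.com/sstangl/openpowerlifting | meet-data/fpr/fpr-probe.py | fix_html
-- ===== SOURCE A (Python) =====
-- def fix_html(html):
--     tag_dict = {}
--     remove_tags = []
--
--     ii = 0
--     split_html = html.split('<')
--
--     # Find unopened tags
--     for tag_start in split_html:
--         if tag_start != '':
--             if tag_start[0] == '/':  # Close tag
--                 close_idx = tag_start.find(">")
--                 tag_type = tag_start[1:tag_start.find(">")]
--                 if tag_type not in tag_dict:
--                     remove_tags.append(ii)
--                 elif tag_dict[tag_type] == 0:
--                     remove_tags.append(ii)
--                 else: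
--                     tag_dict[tag_type] -= 1
--
--             elif '/>' not in tag_start and tag_start[0] != 'p':  # Open tag
--                 close_idx = tag_start.find(">")
--                 tag_type = tag_start[0:tag_start.find(">")].split(" ")[0]
--                 if tag_type not in tag_dict:
--                     tag_dict[tag_type] = 1
--                 else:
--                     tag_dict[tag_type] += 1
--         ii = ii + 1
--
--     # Remove the unopened tags
--     for idx in remove_tags:
--         close_idx = split_html[idx].find(">")
--         if len(split_html[idx]) > close_idx + 1:
--             split_html[idx] = split_html[idx][close_idx + 1:]
--         else:
--             split_html[idx] = ''
--
--     split_html = ["<" + line for line in split_html if line != '']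
--     return ''.join(split_html)
-- ===== SOURCE B (Python) =====
-- def fix_html(html):
--     # Different algorithm: classify once into signed tag events, group events by
--     # tag name, and per name decide which close tags are unmatched by a
--     # prefix-sum / running-minimum criterion (no clamped per-tag counters).
--     segs = html.split('<')
--
--     # Stage 1: classify each segment into a signed tag event (index, name, +/-1).
--     events = []
--     for i, seg in enumerate(segs):
--         if seg:
--             if seg[0] == '/':
--                 events.append((i, seg[1:seg.find('>')], -1))
--             elif '/>' not in seg and seg[0] != 'p':
--                 events.append((i, seg[:seg.find('>')].split(' ')[0], 1))
--
--     # Stage 2: group the signed events by tag name.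
--     groups = {}
--     for i, name, sign in events:
--         groups.setdefault(name, []).append((i, sign))
--
--     # Stage 3: per name, a close tag is unmatched exactly when the
--     # open-minus-close prefix sum before it equals its running minimum (with 0).
--     removed = set()
--     for evs in groups.values():
--         s = 0
--         m = 0
--         for i, sign in evs:
--             if sign < 0 and s <= m:
--                 removed.add(i)
--             s += sign
--             if s < m:
--                 m = s
--
--     # Stage 4: rebuild, stripping the unmatched close tags.
--     parts = []
--     for i, seg in enumerate(segs):
--         if i in removed:
--             j = seg.find('>')
--             seg = seg[j + 1:] if len(seg) > j + 1 else ''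
--         if seg:
--             parts.append('<' + seg)
--     return ''.join(parts)
-- ===== Notes on version B (the rewrite author's own statement) =====
-- stated objective: alternative
-- what changed: B replaces A's interleaved clamped-counter dict simulation plus deferred index-buffer removal pass by a different algorithm: it classifies the segments once into signed tag events, groups the events by tag name into a dict of per-name event lists, decides per name which close tags are unmatched via a prefix-sum/running-minimum criterion (a close tag is unmatched iff the open-minus-close prefix sum before it equals its running minimum with 0), and rebuilds the output in one indexed pass testing set membership.
import Mathlib
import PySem

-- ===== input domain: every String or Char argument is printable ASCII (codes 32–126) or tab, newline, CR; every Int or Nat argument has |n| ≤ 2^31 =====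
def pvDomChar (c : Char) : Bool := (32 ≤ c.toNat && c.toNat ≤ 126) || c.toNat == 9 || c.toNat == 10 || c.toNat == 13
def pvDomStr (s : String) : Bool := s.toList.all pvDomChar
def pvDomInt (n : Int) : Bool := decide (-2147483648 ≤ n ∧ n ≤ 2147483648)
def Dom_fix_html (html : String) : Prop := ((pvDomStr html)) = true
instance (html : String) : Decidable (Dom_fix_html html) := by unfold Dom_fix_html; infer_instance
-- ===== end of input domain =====

-- B replaces A's interleaved clamped-counter simulation with: classify segments into signed
-- tag events once, group the events by tag name, and per name mark a close tag unmatched iff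
-- the open-minus-close prefix sum before it equals its running minimum; objective: alternative.

-- ===== PORT A =====
-- Segments of `html.split('<')` are `List Char`; dict keys are `List Char`, values Python ints.

-- first loop of A: builds tag_dict and remove_tags (indices ii of unmatched close tags)
def fhLoop1 : List (List Char) → PySem.Dict (List Char) Int → List Int → Int →
    PySem.Dict (List Char) Int × List Int
  | [], tag_dict, remove_tags, _ => (tag_dict, remove_tags)
  | tag_start :: rest, tag_dict, remove_tags, ii =>
    if tag_start ≠ [] then
      if PySem.List.pyGet? tag_start 0 = some '/' then
        let tag_type := PySem.Chars.slice tag_start (some 1) (some (PySem.Chars.find tag_start ['>']))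
        if tag_dict.get? tag_type = none then
          fhLoop1 rest tag_dict (remove_tags ++ [ii]) (ii + 1)
        else if tag_dict.getD tag_type 0 = 0 then
          fhLoop1 rest tag_dict (remove_tags ++ [ii]) (ii + 1)
        else
          fhLoop1 rest (tag_dict.insert tag_type (tag_dict.getD tag_type 0 - 1)) remove_tags (ii + 1)
      else if PySem.Chars.isIn ['/', '>'] tag_start = false ∧ PySem.List.pyGet? tag_start 0 ≠ some 'p' then
        let tag_type := PySem.List.pyGetD
          (PySem.Chars.splitOn (PySem.Chars.slice tag_start (some 0) (some (PySem.Chars.find tag_start ['>']))) [' ']) 0 []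
        if tag_dict.get? tag_type = none then
          fhLoop1 rest (tag_dict.insert tag_type 1) remove_tags (ii + 1)
        else
          fhLoop1 rest (tag_dict.insert tag_type (tag_dict.getD tag_type 0 + 1)) remove_tags (ii + 1)
      else fhLoop1 rest tag_dict remove_tags (ii + 1)
    else fhLoop1 rest tag_dict remove_tags (ii + 1)

-- second loop of A: for idx in remove_tags, strip split_html[idx] up to and including '>'
-- (idx is always a valid index — produced as a position by the first loop — so the total
--  pyGetD/pySetD forms read/write exactly what Python does)
def fhLoop2 : List (List Char) → List Int → List (List Char)
  | split_html, [] => split_html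
  | split_html, idx :: rest =>
    let s := PySem.List.pyGetD split_html idx []
    let close_idx := PySem.Chars.find s ['>']
    let s' := if PySem.Chars.len s > close_idx + 1
      then PySem.Chars.slice s (some (close_idx + 1)) none else []
    fhLoop2 (PySem.List.pySetD split_html idx s') rest

def fix_html (html : String) : String :=
  let split_html := PySem.Chars.splitOn html.toList ['<']
  let remove_tags := (fhLoop1 split_html PySem.Dict.empty [] 0).2
  let split_html2 := fhLoop2 split_html remove_tags
  String.ofList (PySem.Chars.join []
    ((split_html2.filter (fun line => decide (line ≠ []))).map (fun line => ['<'] ++ line)))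

-- ===== PORT B =====
-- Stage 1: classify each segment into a signed tag event (index, name, sign = ±1)
def fhbEvents : List (List Char) → Int → List (Int × List Char × Int)
  | [], _ => []
  | seg :: rest, i =>
    (if seg ≠ [] then
      if PySem.List.pyGet? seg 0 = some '/' then
        [(i, PySem.Chars.slice seg (some 1) (some (PySem.Chars.find seg ['>'])), (-1 : Int))]
      else if PySem.Chars.isIn ['/', '>'] seg = false ∧ PySem.List.pyGet? seg 0 ≠ some 'p' then
        [(i, PySem.List.pyGetD
            (PySem.Chars.splitOn (PySem.Chars.slice seg (some 0) (some (PySem.Chars.find seg ['>']))) [' ']) 0 [],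
          (1 : Int))]
      else []
    else []) ++ fhbEvents rest (i + 1)

-- Stage 2: group the signed events by tag name (setdefault(name, []).append((i, sign)))
def fhbGroups (evs : List (Int × List Char × Int)) : PySem.Dict (List Char) (List (Int × Int)) :=
  evs.foldl (fun g p => g.modify p.2.1 [] (fun l => l ++ [(p.1, p.2.2)])) PySem.Dict.empty

-- Stage 3 inner loop: prefix sum s and running minimum m over one name's events
def fhbScan : List (Int × Int) → PySem.Set Int → Int → Int → PySem.Set Int
  | [], r, _, _ => r
  | (i, sign) :: rest, r, s, m =>
    let r' := if sign < 0 ∧ s ≤ m then PySem.Set.add r i else r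
    let s' := s + sign
    let m' := if s' < m then s' else m
    fhbScan rest r' s' m'

def fhbRemoved (gs : PySem.Dict (List Char) (List (Int × Int))) : PySem.Set Int :=
  gs.values.foldl (fun r evs => fhbScan evs r 0 0) PySem.Set.empty

-- Stage 4: rebuild, stripping the unmatched close tags by index membership
def fhbBuild : List (List Char) → Int → PySem.Set Int → List (List Char)
  | [], _, _ => []
  | seg :: rest, i, removed =>
    let seg' := if PySem.Set.contains removed i then
        let j := PySem.Chars.find seg ['>']
        if PySem.Chars.len seg > j + 1 then PySem.Chars.slice seg (some (j + 1)) none else []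
      else seg
    (if seg' ≠ [] then [['<'] ++ seg'] else []) ++ fhbBuild rest (i + 1) removed

def fix_html_alt (html : String) : String :=
  let segs := PySem.Chars.splitOn html.toList ['<']
  String.ofList (PySem.Chars.join []
    (fhbBuild segs 0 (fhbRemoved (fhbGroups (fhbEvents segs 0)))))

-- ===== PRECONDITION & SPEC =====
def Spec_fix_html (html : String) (out : String) : Prop := out = fix_html_alt html
instance (html : String) (out : String) : Decidable (Spec_fix_html html out) := by unfold Spec_fix_html; infer_instance

-- ===== CLAIM (what is proved, stated in full; the proofs are below) =====
def Claim_equal_fix_html : Prop := ∀ (html : String), Dom_fix_html html → Spec_fix_html html (fix_html html)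

-- ===== LEMMAS AND PROOFS =====

-- proof-side restatement of A's first loop: the 0-based positions it removes, given a start dict
def removedN : List (List Char) → PySem.Dict (List Char) Int → List Nat
  | [], _ => []
  | s :: rest, d =>
    if s ≠ [] then
      if PySem.List.pyGet? s 0 = some '/' then
        let tag := PySem.Chars.slice s (some 1) (some (PySem.Chars.find s ['>']))
        if d.get? tag = none then 0 :: (removedN rest d).map (· + 1)
        else if d.getD tag 0 = 0 then 0 :: (removedN rest d).map (· + 1)
        else (removedN rest (d.insert tag (d.getD tag 0 - 1))).map (· + 1)
      else if PySem.Chars.isIn ['/', '>'] s = false ∧ PySem.List.pyGet? s 0 ≠ some 'p' then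
        let tag := PySem.List.pyGetD
          (PySem.Chars.splitOn (PySem.Chars.slice s (some 0) (some (PySem.Chars.find s ['>']))) [' ']) 0 []
        if d.get? tag = none then (removedN rest (d.insert tag 1)).map (· + 1)
        else (removedN rest (d.insert tag (d.getD tag 0 + 1))).map (· + 1)
      else (removedN rest d).map (· + 1)
    else (removedN rest d).map (· + 1)

-- proof-side clamped simulation of A over the event list, keeping each removed index with its name
def removedE : List (Int × List Char × Int) → PySem.Dict (List Char) Int → List (Int × List Char)
  | [], _ => []
  | (i, t, sg) :: rest, d =>
    if sg < 0 then
      if 0 < d.getD t 0 then removedE rest (d.insert t (d.getD t 0 - 1))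
      else (i, t) :: removedE rest d
    else removedE rest (d.insert t (d.getD t 0 + 1))

-- proof-side single-name clamped counter
def clampOne : List (Int × Int) → Int → List Int
  | [], _ => []
  | (i, sg) :: rest, c =>
    if sg < 0 then
      if 0 < c then clampOne rest (c - 1) else i :: clampOne rest c
    else clampOne rest (c + 1)

-- the event sublist of one name, projected to (index, sign) — what B's groups store per name
def projEvents (t : List Char) (evs : List (Int × List Char × Int)) : List (Int × Int) :=
  (evs.filter (fun p => p.2.1 == t)).map (fun p => (p.1, p.2.2))

theorem map_shift0 (ns : List Nat) :
    (ns.map (· + 1)).map (fun n : Nat => (n : Int)) = ns.map (fun n : Nat => (n : Int) + 1) := by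
  rw [List.map_map]
  apply List.map_congr_left
  intro n _
  simp only [Function.comp]
  push_cast
  ring

theorem fhLoop1_spec (segs : List (List Char)) : ∀ (d : PySem.Dict (List Char) Int)
    (rt : List Int) (ii : Int),
    (fhLoop1 segs d rt ii).2 = rt ++ (removedN segs d).map (fun n : Nat => ii + (n : Int)) := by
  induction segs with
  | nil => intro d rt ii; simp [fhLoop1, removedN]
  | cons s rest ih =>
    intro d rt ii
    simp only [fhLoop1, removedN]
    split_ifs <;>
        simp [ih, List.append_assoc] <;>
      (intro a _; omega)

theorem getD_of_get?_none (d : PySem.Dict (List Char) Int) (k : List Char) (v : Int)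
    (h : d.get? k = none) : d.getD k v = v := by
  have : d.getD k v = (d.get? k).getD v := rfl
  rw [this, h]; rfl

theorem inv_insert (d : PySem.Dict (List Char) Int) (t : List Char) (v : Int)
    (hd : ∀ k, 0 ≤ d.getD k 0) (hv : 0 ≤ v) : ∀ k, 0 ≤ (d.insert t v).getD k 0 := by
  intro k
  rw [PySem.Dict.getD_insert]
  split_ifs
  · exact hv
  · exact hd k

-- A's removed positions, as absolute indices with names, over the event list
theorem map_shift1 (l : List Nat) (i0 : Int) :
    (l.map (· + 1)).map (fun n : Nat => i0 + (n : Int)) = l.map (fun n : Nat => (i0 + 1) + (n : Int)) := by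
  rw [List.map_map]
  apply List.map_congr_left
  intro n _
  simp only [Function.comp]
  push_cast
  ring

theorem removedN_events (segs : List (List Char)) : ∀ (d : PySem.Dict (List Char) Int) (i0 : Int),
    (∀ k, 0 ≤ d.getD k 0) →
    (removedN segs d).map (fun n : Nat => i0 + (n : Int))
      = (removedE (fhbEvents segs i0) d).map Prod.fst := by
  induction segs with
  | nil => intro d i0 _; simp [removedN, fhbEvents, removedE]
  | cons s rest ih =>
    intro d i0 hd
    simp only [removedN, fhbEvents]
    by_cases h0 : s = []
    · simp only [h0, ne_eq, not_true_eq_false, ite_false, List.nil_append]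
      rw [map_shift1, ← ih _ _ hd]
    · rw [if_pos h0, if_pos h0]
      by_cases hsl : PySem.List.pyGet? s 0 = some '/'
      · rw [if_pos hsl, if_pos hsl]
        set tc := PySem.Chars.slice s (some 1) (some (PySem.Chars.find s ['>'])) with htc
        simp only [List.singleton_append, removedE]
        rw [if_pos (show (-1:Int) < 0 by norm_num)]
        by_cases hnone : d.get? tc = none
        · have hz : d.getD tc 0 = 0 := getD_of_get?_none _ _ _ hnone
          rw [if_pos hnone, if_neg (by omega)]
          rw [List.map_cons, List.map_cons, map_shift1, ih _ _ hd]
          simp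
        · rw [if_neg hnone]
          by_cases hz : d.getD tc 0 = 0
          · rw [if_pos hz, if_neg (by omega), List.map_cons, List.map_cons, map_shift1, ih _ _ hd]
            simp
          · have hpos : 0 < d.getD tc 0 := by have := hd tc; omega
            rw [if_neg hz, if_pos hpos, map_shift1, ih _ _ (inv_insert d tc _ hd (by omega))]
      · rw [if_neg hsl, if_neg hsl]
        by_cases hop : PySem.Chars.isIn ['/', '>'] s = false ∧ PySem.List.pyGet? s 0 ≠ some 'p'
        · rw [if_pos hop, if_pos hop]
          set tg := PySem.List.pyGetD
            (PySem.Chars.splitOn (PySem.Chars.slice s (some 0) (some (PySem.Chars.find s ['>']))) [' ']) 0 [] with htg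
          simp only [List.singleton_append, removedE]
          rw [if_neg (show ¬ (1:Int) < 0 by norm_num)]
          by_cases hnone : d.get? tg = none
          · have hz : d.getD tg 0 = 0 := getD_of_get?_none _ _ _ hnone
            rw [if_pos hnone, map_shift1, hz, zero_add, ih _ _ (inv_insert d tg 1 hd (by omega))]
          · rw [if_neg hnone, map_shift1,
              ih _ _ (inv_insert d tg _ hd (by have := hd tg; omega))]
        · rw [if_neg hop, if_neg hop, List.nil_append, map_shift1, ih _ _ hd]

theorem removedN_sorted (segs : List (List Char)) : ∀ (d : PySem.Dict (List Char) Int),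
    (removedN segs d).Pairwise (· < ·) := by
  induction segs with
  | nil => intro d; simp [removedN]
  | cons s rest ih =>
    have hmap : ∀ l : List Nat, l.Pairwise (· < ·) → (l.map (· + 1)).Pairwise (· < ·) :=
      fun l h => List.pairwise_map.mpr (h.imp (by omega))
    have hcons : ∀ l : List Nat, l.Pairwise (· < ·) → (0 :: l.map (· + 1)).Pairwise (· < ·) := by
      intro l h
      rw [List.pairwise_cons]
      refine ⟨?_, hmap l h⟩
      intro y hy
      obtain ⟨a, _, rfl⟩ := List.mem_map.mp hy
      omega
    intro d
    simp only [removedN]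
    split_ifs <;> first | exact hmap _ (ih _) | exact hcons _ (ih _)

-- per-name decomposition of the clamped simulation
theorem projEvents_cons (t t' : List Char) (i sg : Int) (rest : List (Int × List Char × Int)) :
    projEvents t ((i, t', sg) :: rest)
      = if t' = t then (i, sg) :: projEvents t rest else projEvents t rest := by
  by_cases h : t' = t <;> simp [projEvents, h]

theorem removedE_filter (evs : List (Int × List Char × Int)) :
    ∀ (d : PySem.Dict (List Char) Int) (t : List Char),
    (removedE evs d).filter (fun p => p.2 == t)
      = (clampOne (projEvents t evs) (d.getD t 0)).map (fun i => (i, t)) := by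
  induction evs with
  | nil => intro d t; simp [removedE, projEvents, clampOne]
  | cons p rest ih =>
    obtain ⟨i, t', sg⟩ := p
    intro d t
    rw [projEvents_cons]
    by_cases ht : t' = t
    · subst ht
      rw [if_pos rfl]
      simp only [removedE]
      by_cases hsg : sg < 0
      · rw [if_pos hsg]
        simp only [clampOne, if_pos hsg]
        by_cases hc : 0 < d.getD t' 0
        · rw [if_pos hc, if_pos hc, ih, PySem.Dict.getD_insert_self]
        · rw [if_neg hc, if_neg hc, List.filter_cons_of_pos (by simp), ih, List.map_cons]
      · rw [if_neg hsg]
        simp only [clampOne, if_neg hsg]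
        rw [ih, PySem.Dict.getD_insert_self]
    · rw [if_neg ht]
      simp only [removedE]
      by_cases hsg : sg < 0
      · rw [if_pos hsg]
        by_cases hc : 0 < d.getD t' 0
        · rw [if_pos hc, ih]
          simp only [PySem.Dict.getD_insert, if_neg (show ¬ t = t' from fun h => ht h.symm)]
        · rw [if_neg hc, List.filter_cons_of_neg (by simp [ht]), ih]
      · rw [if_neg hsg, ih]
        simp only [PySem.Dict.getD_insert, if_neg (show ¬ t = t' from fun h => ht h.symm)]

-- B's inner scan is the clamped counter with count = s - m
theorem fhbScan_eq (evs : List (Int × Int)) : ∀ (r : PySem.Set Int) (s m : Int),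
    (∀ p ∈ evs, p.2 = 1 ∨ p.2 = -1) → m ≤ 0 → m ≤ s →
    fhbScan evs r s m = PySem.Set.update r (clampOne evs (s - m)) := by
  induction evs with
  | nil => intro r s m _ _ _; simp [fhbScan, clampOne, PySem.Set.update_nil]
  | cons p rest ih =>
    obtain ⟨i, sg⟩ := p
    intro r s m hsg hm0 hms
    have hrest : ∀ q ∈ rest, q.2 = 1 ∨ q.2 = -1 := fun q hq => hsg q (List.mem_cons_of_mem _ hq)
    have h1 : sg = 1 ∨ sg = -1 := hsg (i, sg) List.mem_cons_self
    simp only [fhbScan, clampOne]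
    split_ifs <;>
      first
        | (exfalso; omega)
        | (rw [ih _ _ _ hrest (by omega) (by omega)];
           try rw [PySem.Set.update_cons];
           congr 2 <;> omega)

theorem fhbEvents_sign (segs : List (List Char)) : ∀ (i0 : Int) (p : Int × List Char × Int),
    p ∈ fhbEvents segs i0 → p.2.2 = 1 ∨ p.2.2 = -1 := by
  induction segs with
  | nil => intro i0 p h; simp [fhbEvents] at h
  | cons s rest ih =>
    intro i0 p h
    simp only [fhbEvents, List.mem_append] at h
    rcases h with h | h
    · split_ifs at h <;> simp_all
    · exact ih _ _ h

theorem fhbGroups_getD (evs : List (Int × List Char × Int)) (t : List Char) :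
    (fhbGroups evs).getD t [] = projEvents t evs := by
  have h : fhbGroups evs = (evs.map (fun p => (p.2.1, (p.1, p.2.2)))).foldl
      (fun d q => d.modify q.1 [] (fun l => l ++ [q.2])) PySem.Dict.empty := by
    rw [List.foldl_map]
    rfl
  rw [h, PySem.Dict.getD_foldl_modify_append, PySem.Dict.getD_empty, List.nil_append,
    List.filter_map, projEvents, List.map_map]
  rfl

theorem fhbGroups_keys (evs : List (Int × List Char × Int)) :
    (fhbGroups evs).keys = PySem.Set.ofList (evs.map (fun p => p.2.1)) := by
  rw [fhbGroups, PySem.Dict.keys_foldl_modify_key, PySem.Dict.keys_empty,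
    PySem.Set.update_nil_left]

theorem fhbGroups_nodup (evs : List (Int × List Char × Int)) :
    (fhbGroups evs).keys.Nodup := by
  exact PySem.Dict.nodup_keys_foldl_modify_key evs (fun p => p.2.1) [] _ _ PySem.Dict.nodup_keys_empty

-- membership in B's removed set = membership in A's clamped-simulation result
theorem mem_scan_fold (n : Int) (Ls : List (List (Int × Int))) : ∀ (r : PySem.Set Int),
    (∀ L ∈ Ls, ∀ p ∈ L, p.2 = 1 ∨ p.2 = -1) →
    (n ∈ Ls.foldl (fun r L => fhbScan L r 0 0) r ↔ n ∈ r ∨ ∃ L ∈ Ls, n ∈ clampOne L 0) := by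
  induction Ls with
  | nil => intro r _; simp
  | cons L Ls ih =>
    intro r h
    rw [List.foldl_cons,
      fhbScan_eq L r 0 0 (h L List.mem_cons_self) le_rfl le_rfl,
      ih _ (fun L' hL' => h L' (List.mem_cons_of_mem _ hL'))]
    rw [show (0:Int) - 0 = 0 by ring]
    constructor
    · rintro (hr | hex)
      · rcases (PySem.Set.mem_update _ _ _).mp hr with h' | h'
        · exact Or.inl h'
        · exact Or.inr ⟨L, List.mem_cons_self, h'⟩
      · obtain ⟨L', hL', hn⟩ := hex
        exact Or.inr ⟨L', List.mem_cons_of_mem _ hL', hn⟩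
    · rintro (hr | ⟨L', hL', hn⟩)
      · exact Or.inl ((PySem.Set.mem_update _ _ _).mpr (Or.inl hr))
      · rcases List.mem_cons.mp hL' with rfl | hL'
        · exact Or.inl ((PySem.Set.mem_update _ _ _).mpr (Or.inr hn))
        · exact Or.inr ⟨L', hL', hn⟩

theorem mem_removed (evs : List (Int × List Char × Int))
    (hsg : ∀ p ∈ evs, p.2.2 = 1 ∨ p.2.2 = -1) (n : Int) :
    PySem.Set.contains (fhbRemoved (fhbGroups evs)) n = true
      ↔ n ∈ (removedE evs PySem.Dict.empty).map Prod.fst := by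
  have hsgP : ∀ (t : List Char), ∀ p ∈ projEvents t evs, p.2 = 1 ∨ p.2 = -1 := by
    intro t p hp
    obtain ⟨q, hq, rfl⟩ := List.mem_map.mp hp
    exact hsg q (List.mem_filter.mp hq).1
  have hval : (fhbGroups evs).values
      = (fhbGroups evs).keys.map (fun t => projEvents t evs) := by
    rw [PySem.Dict.values_eq_map_keys _ (fhbGroups_nodup evs) []]
    apply List.map_congr_left
    intro t _
    exact fhbGroups_getD evs t
  rw [PySem.Set.contains_iff, fhbRemoved, hval,
    mem_scan_fold n _ PySem.Set.empty
      (by intro L hL p hp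
          obtain ⟨t, _, rfl⟩ := List.mem_map.mp hL
          exact hsgP t p hp)]
  have hAside : ∀ t : List Char,
      ((n, t) ∈ removedE evs PySem.Dict.empty ↔ n ∈ clampOne (projEvents t evs) 0) := by
    intro t
    constructor
    · intro h
      have h' : (n, t) ∈ (removedE evs PySem.Dict.empty).filter (fun p => p.2 == t) :=
        List.mem_filter.mpr ⟨h, by simp⟩
      rw [removedE_filter, PySem.Dict.getD_empty] at h'
      obtain ⟨i, hi, hit⟩ := List.mem_map.mp h'
      cases hit
      exact hi
    · intro h
      have h' : (n, t) ∈ (clampOne (projEvents t evs) ((PySem.Dict.empty : PySem.Dict (List Char) Int).getD t 0)).map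
          (fun i => (i, t)) := by
        rw [PySem.Dict.getD_empty]
        exact List.mem_map.mpr ⟨n, h, rfl⟩
      rw [← removedE_filter] at h'
      exact (List.mem_filter.mp h').1
  constructor
  · rintro (h | ⟨L, hL, hn⟩)
    · simp [PySem.Set.empty] at h
    · obtain ⟨t, _, rfl⟩ := List.mem_map.mp hL
      exact List.mem_map.mpr ⟨(n, t), (hAside t).mpr hn, rfl⟩
  · intro h
    obtain ⟨⟨i, t⟩, hp, hfst⟩ := List.mem_map.mp h
    cases hfst
    right
    refine ⟨projEvents t evs, ?_, (hAside t).mp hp⟩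
    have hne : projEvents t evs ≠ [] := by
      intro hnil
      have hc := (hAside t).mp hp
      rw [hnil] at hc
      simp [clampOne] at hc
    have ht : t ∈ (fhbGroups evs).keys := by
      rw [fhbGroups_keys, PySem.Set.mem_ofList]
      obtain ⟨q, hq⟩ : ∃ q, q ∈ evs.filter (fun p => p.2.1 == t) := by
        rcases hq : evs.filter (fun p => p.2.1 == t) with _ | ⟨q, l⟩
        · exact absurd (by simp [projEvents, hq]) hne
        · exact ⟨q, by rw [hq]; exact List.mem_cons_self⟩
      have hqt : q.2.1 = t := by simpa using (List.mem_filter.mp hq).2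
      exact List.mem_map.mpr ⟨q, (List.mem_filter.mp hq).1, hqt⟩
    exact List.mem_map.mpr ⟨t, ht, rfl⟩

-- the rebuild: A's deferred index-by-index stripping then filter/map = B's single build pass
theorem fhLoop2_shift (ns : List Nat) (x : List Char) (xs : List (List Char)) :
    fhLoop2 (x :: xs) (ns.map (fun n : Nat => ((n : Int) + 1))) = x :: fhLoop2 xs (ns.map (fun n : Nat => (n : Int))) := by
  induction ns generalizing x xs with
  | nil => simp [fhLoop2]
  | cons n ns ih =>
    rw [List.map_cons, List.map_cons]
    rw [fhLoop2, fhLoop2]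
    have hc : ((n : Int) + 1) = ((n + 1 : Nat) : Int) := by push_cast; ring
    simp only [hc, PySem.List.pyGetD_natCast, PySem.List.pySetD_natCast, List.getD_cons_succ,
      List.set_cons_succ]
    exact ih _ _

theorem fhLoop2_keep (ns : List Nat) (x : List Char) (xs : List (List Char)) :
    fhLoop2 (x :: xs) (((ns.map (· + 1)).map (fun n : Nat => (n : Int))))
      = x :: fhLoop2 xs (ns.map (fun n : Nat => (n : Int))) := by
  rw [map_shift0, ← fhLoop2_shift]

theorem fhLoop2_rem (ns : List Nat) (x : List Char) (xs : List (List Char)) :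
    fhLoop2 (x :: xs) (((0 :: ns.map (· + 1)).map (fun n : Nat => (n : Int))))
      = (if PySem.Chars.len x > PySem.Chars.find x ['>'] + 1
          then PySem.Chars.slice x (some (PySem.Chars.find x ['>'] + 1)) none else [])
        :: fhLoop2 xs (ns.map (fun n : Nat => (n : Int))) := by
  rw [List.map_cons]
  rw [fhLoop2]
  simp only [PySem.List.pyGetD_natCast, PySem.List.pySetD_natCast, List.getD_cons_zero,
    List.set_cons_zero]
  exact fhLoop2_keep ns _ xs

theorem fhLoop2_nil (l : List Int) : fhLoop2 [] l = [] := by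
  induction l with
  | nil => rfl
  | cons i rest ih =>
    rw [fhLoop2]
    have h2 : ∀ v : List Char, PySem.List.pySetD ([] : List (List Char)) i v = [] := by
      intro v
      simp only [PySem.List.pySetD, PySem.List.pySet?, PySem.List.pyIdx?, List.length_nil]
      split_ifs <;> simp
    rw [h2, ih]

theorem unshift_list (l : List Nat) (h : ∀ x ∈ l, 0 < x) :
    l = (l.map (· - 1)).map (· + 1) := by
  rw [List.map_map]
  conv_lhs => rw [← List.map_id l]
  apply List.map_congr_left
  intro x hx
  have := h x hx
  simp only [Function.comp, id]
  omega

theorem build_main (segs : List (List Char)) : ∀ (rs : List Nat) (R : PySem.Set Int) (k : Int),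
    rs.Pairwise (· < ·) →
    (∀ n : Nat, PySem.Set.contains R (k + (n : Int)) = decide (n ∈ rs)) →
    ((fhLoop2 segs (rs.map (fun n : Nat => (n : Int)))).filter
        (fun line => decide (line ≠ []))).map (fun line => ['<'] ++ line)
      = fhbBuild segs k R := by
  induction segs with
  | nil => intro rs R k _ _; rw [fhLoop2_nil]; rfl
  | cons seg rest ih =>
    intro rs R k hp hR
    have hRk : PySem.Set.contains R k = decide ((0 : Nat) ∈ rs) := by
      have := hR 0
      simpa using this
    by_cases h0 : 0 ∈ rs
    · -- the head segment is stripped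
      obtain ⟨l, rfl⟩ : ∃ l, rs = 0 :: l := by
        cases rs with
        | nil => simp at h0
        | cons a l =>
          rcases List.mem_cons.mp h0 with h | h
          · exact ⟨l, by rw [← h]⟩
          · have := (List.pairwise_cons.mp hp).1 _ h
            omega
      have hl1 : ∀ x ∈ l, 0 < x := (List.pairwise_cons.mp hp).1
      have hpl : l.Pairwise (· < ·) := (List.pairwise_cons.mp hp).2
      set ns := l.map (· - 1) with hns
      have hlns : l = ns.map (· + 1) := unshift_list l hl1
      rw [show ((0 :: l).map (fun n : Nat => (n : Int)))
          = ((0 :: ns.map (· + 1)).map (fun n : Nat => (n : Int))) from by rw [← hlns]]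
      rw [fhLoop2_rem]
      simp only [fhbBuild]
      rw [hRk, decide_eq_true h0]
      simp only [if_true]
      have hRrest : ∀ n : Nat, PySem.Set.contains R ((k + 1) + (n : Int)) = decide (n ∈ ns) := by
        intro n
        have h1 : (k + 1) + (n : Int) = k + ((n + 1 : Nat) : Int) := by push_cast; ring
        rw [h1, hR (n + 1)]
        apply Bool.eq_iff_iff.mpr
        simp only [decide_eq_true_iff]
        rw [hlns]
        constructor
        · intro h
          rcases List.mem_cons.mp h with h | h
          · omega
          · obtain ⟨m, hm, hmn⟩ := List.mem_map.mp h
            have : m = n := by omega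
            rwa [← this]
        · intro h
          exact List.mem_cons_of_mem _ (List.mem_map.mpr ⟨n, h, rfl⟩)
      have hpns : ns.Pairwise (· < ·) := by
        rw [hns]
        rw [List.pairwise_map]
        refine hpl.imp_of_mem ?_
        intro a b ha hb hab
        have := hl1 a ha
        have := hl1 b hb
        omega
      set S := (if PySem.Chars.len seg > PySem.Chars.find seg ['>'] + 1
          then PySem.Chars.slice seg (some (PySem.Chars.find seg ['>'] + 1)) none else []) with hS
      rw [List.filter_cons]
      by_cases hse : S = []
      · rw [if_neg (by simp [hse]), if_neg (by simp [hse]), List.nil_append,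
          ih ns R (k + 1) hpns hRrest]
      · rw [if_pos (by simp [hse]), if_pos (by simpa using hse), List.map_cons,
          List.singleton_append, ih ns R (k + 1) hpns hRrest]
        rfl
    · -- the head segment is kept as is
      have hl1 : ∀ x ∈ rs, 0 < x := by
        intro x hx
        rcases Nat.eq_zero_or_pos x with rfl | h
        · exact absurd hx h0
        · exact h
      set ns := rs.map (· - 1) with hns
      have hlns : rs = ns.map (· + 1) := unshift_list rs hl1
      rw [show (rs.map (fun n : Nat => (n : Int)))
          = ((ns.map (· + 1)).map (fun n : Nat => (n : Int))) from by rw [← hlns]]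
      rw [fhLoop2_keep]
      simp only [fhbBuild]
      rw [hRk, decide_eq_false h0]
      simp only [Bool.false_eq_true, if_false]
      have hRrest : ∀ n : Nat, PySem.Set.contains R ((k + 1) + (n : Int)) = decide (n ∈ ns) := by
        intro n
        have h1 : (k + 1) + (n : Int) = k + ((n + 1 : Nat) : Int) := by push_cast; ring
        rw [h1, hR (n + 1)]
        apply Bool.eq_iff_iff.mpr
        simp only [decide_eq_true_iff]
        rw [hlns]
        constructor
        · intro h
          obtain ⟨m, hm, hmn⟩ := List.mem_map.mp h
          have : m = n := by omega
          rwa [← this]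
        · intro h
          exact List.mem_map.mpr ⟨n, h, rfl⟩
      have hpns : ns.Pairwise (· < ·) := by
        rw [hns]
        rw [List.pairwise_map]
        refine hp.imp_of_mem ?_
        intro a b ha hb hab
        have := hl1 a ha
        have := hl1 b hb
        omega
      rw [List.filter_cons]
      by_cases hse : seg = []
      · rw [if_neg (by simp [hse]), if_neg (by simp [hse]), List.nil_append,
          ih ns R (k + 1) hpns hRrest]
      · rw [if_pos (by simp [hse]), if_pos (by simpa using hse), List.map_cons,
          List.singleton_append, ih ns R (k + 1) hpns hRrest]
        rfl

-- ===== VERDICT (by name: the statement is the Claim_ definition above) =====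
theorem fix_html_spec : Claim_equal_fix_html := by
  intro html _
  show fix_html html = fix_html_alt html
  simp only [fix_html, fix_html_alt]
  rw [fhLoop1_spec _ PySem.Dict.empty [] 0, List.nil_append]
  congr 2
  have hmap : ((removedN (PySem.Chars.splitOn html.toList ['<']) PySem.Dict.empty).map
        (fun n : Nat => (0 : Int) + (n : Int)))
      = (removedN (PySem.Chars.splitOn html.toList ['<']) PySem.Dict.empty).map
        (fun n : Nat => (n : Int)) := by
    simp
  rw [hmap]
  apply build_main _ _ _ 0 (removedN_sorted _ PySem.Dict.empty)
  intro n
  have hEvs : (removedE (fhbEvents (PySem.Chars.splitOn html.toList ['<']) 0) PySem.Dict.empty).map Prod.fst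
      = (removedN (PySem.Chars.splitOn html.toList ['<']) PySem.Dict.empty).map
        (fun m : Nat => (0 : Int) + (m : Int)) :=
    (removedN_events _ PySem.Dict.empty 0 (fun k => by rw [PySem.Dict.getD_empty])).symm
  apply Bool.eq_iff_iff.mpr
  rw [decide_eq_true_iff,
    mem_removed _ (fun p hp => fhbEvents_sign _ 0 p hp) (0 + (n : Int)), hEvs]
  constructor
  · intro h
    obtain ⟨m, hm, heq⟩ := List.mem_map.mp h
    have : m = n := by omega
    rwa [← this]
  · intro h
    exact List.mem_map.mpr ⟨n, h, rfl⟩
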